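-- pv_equiv track=rewrite | github.com/itzmejanak/ChargeGhar | structure.py | _categorize_serializers
-- ===== SOURCE A (Python) =====
-- from typing import List, Dict, Tuple, Optional
--
-- def _categorize_serializers(serializers: List[str]) -> Dict[str, List[str]]:
--     """Categorize serializers by common prefixes"""
--     categories = {}
--
--     # Common categories
--     category_keywords = {
--         'Authentication Serializers': ['Login', 'Register', 'OTP', 'Auth', 'Token', 'Password'],
--         'Profile Serializers': ['Profile', 'KYC', 'Device'],
--         'User Serializers': ['User'],
--         'Payment Serializers': ['Payment', 'Transaction', 'Wallet', 'Refund'],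
--         'Station Serializers': ['Station', 'PowerBank'],
--         'Rental Serializers': ['Rental', 'Package'],
--         'Point Serializers': ['Point', 'Referral'],
--         'Notification Serializers': ['Notification'],
--         'Admin Serializers': ['Admin'],
--         'Utility Serializers': ['Filter', 'Analytics', 'List', 'Detail', 'Basic', 'Response']
--     }
--
--     categorized = set()
--
--     for category, keywords in category_keywords.items():
--         matches = []
--         for serializer in serializers:
--             if serializer not in categorized:
--                 for keyword in keywords:
--                     if keyword in serializer:
--                         matches.append(serializer)
--                         categorized.add(serializer)
--                         break
--
--         if matches:
--             categories[category] = matches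
--
--     # Uncategorized
--     uncategorized = [s for s in serializers if s not in categorized]
--     if uncategorized:
--         categories['Other Serializers'] = uncategorized
--
--     return categories
-- ===== SOURCE B (Python) =====
-- from typing import List, Dict
--
-- _CATEGORY_KEYWORDS = [
--     ('Authentication Serializers', ['Login', 'Register', 'OTP', 'Auth', 'Token', 'Password']),
--     ('Profile Serializers', ['Profile', 'KYC', 'Device']),
--     ('User Serializers', ['User']),
--     ('Payment Serializers', ['Payment', 'Transaction', 'Wallet', 'Refund']),
--     ('Station Serializers', ['Station', 'PowerBank']),
--     ('Rental Serializers', ['Rental', 'Package']),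
--     ('Point Serializers', ['Point', 'Referral']),
--     ('Notification Serializers', ['Notification']),
--     ('Admin Serializers', ['Admin']),
--     ('Utility Serializers', ['Filter', 'Analytics', 'List', 'Detail', 'Basic', 'Response']),
-- ]
--
--
-- def _categorize_serializers(serializers: List[str]) -> Dict[str, List[str]]:
--     """Single pass: classify each serializer into the bucket of its first
--     matching category (or 'other'), then emit non-empty buckets in table order."""
--     buckets = [[] for _ in _CATEGORY_KEYWORDS]
--     other = []
--     categorized = set()
--     for s in serializers:
--         if s in categorized:
--             continue
--         for i, (_, keywords) in enumerate(_CATEGORY_KEYWORDS):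
--             if any(k in s for k in keywords):
--                 buckets[i].append(s)
--                 categorized.add(s)
--                 break
--         else:
--             other.append(s)
--     result = {name: b for (name, _), b in zip(_CATEGORY_KEYWORDS, buckets) if b}
--     if other:
--         result['Other Serializers'] = other
--     return result
-- ===== Notes on version B (the rewrite author's own statement) =====
-- stated objective: alternative
-- what changed: B makes a single pass over the serializers, classifying each one into the bucket of its first matching category (or an 'other' list) as it goes, instead of A's one full rescan of the serializer list per category; the result is then assembled from the non-empty buckets in table order.
import Mathlib
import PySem

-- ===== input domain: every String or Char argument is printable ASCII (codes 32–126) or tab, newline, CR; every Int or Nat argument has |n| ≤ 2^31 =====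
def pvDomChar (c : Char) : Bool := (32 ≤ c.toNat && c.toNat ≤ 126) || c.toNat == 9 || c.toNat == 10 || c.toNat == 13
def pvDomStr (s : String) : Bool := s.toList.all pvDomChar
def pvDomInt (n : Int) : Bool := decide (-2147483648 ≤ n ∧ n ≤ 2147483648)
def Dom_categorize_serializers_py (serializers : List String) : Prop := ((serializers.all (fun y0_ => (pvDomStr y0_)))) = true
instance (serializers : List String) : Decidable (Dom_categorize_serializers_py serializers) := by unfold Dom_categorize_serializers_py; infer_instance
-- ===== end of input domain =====

-- B is a single pass over the serializers with per-category buckets, instead of A's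
-- one full scan of the list per category: same return value, different decomposition.

-- ===== PORT A =====
-- the category_keywords dict literal (fixed distinct keys, so ported as a plain list of pairs)
def pvKwTable : List (String × List String) :=
  [("Authentication Serializers", ["Login", "Register", "OTP", "Auth", "Token", "Password"]),
   ("Profile Serializers", ["Profile", "KYC", "Device"]),
   ("User Serializers", ["User"]),
   ("Payment Serializers", ["Payment", "Transaction", "Wallet", "Refund"]),
   ("Station Serializers", ["Station", "PowerBank"]),
   ("Rental Serializers", ["Rental", "Package"]),
   ("Point Serializers", ["Point", "Referral"]),
   ("Notification Serializers", ["Notification"]),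
   ("Admin Serializers", ["Admin"]),
   ("Utility Serializers", ["Filter", "Analytics", "List", "Detail", "Basic", "Response"])]

-- 'for keyword in keywords: if keyword in serializer: …; break' = first hit of 'any'
def pvKwAny (kws : List String) (s : String) : Bool := kws.any (fun k => PySem.Str.isIn k s)

-- body of A's inner 'for serializer in serializers' loop; state = (matches, categorized)
def pvAStep (kws : List String) (ms : List String × PySem.Set String) (s : String) :
    List String × PySem.Set String :=
  if PySem.Set.contains ms.2 s then ms
  else if pvKwAny kws s then (ms.1 ++ [s], PySem.Set.add ms.2 s) else ms

-- body of A's outer 'for category, keywords in category_keywords.items()' loop;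
-- 'categories[category] = matches' appends a fresh key (the 11 keys are distinct literals)
def pvAOuterStep (serializers : List String)
    (st : List (String × List String) × PySem.Set String) (ck : String × List String) :
    List (String × List String) × PySem.Set String :=
  let ms := serializers.foldl (pvAStep ck.2) ([], st.2)
  (if ms.1 ≠ [] then st.1 ++ [(ck.1, ms.1)] else st.1, ms.2)

def categorize_serializers_py (serializers : List String) : List (String × List String) :=
  let st := pvKwTable.foldl (pvAOuterStep serializers) ([], PySem.Set.empty)
  let uncategorized := serializers.filter (fun s => !(PySem.Set.contains st.2 s))
  if uncategorized ≠ [] then st.1 ++ [("Other Serializers", uncategorized)] else st.1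

-- ===== PORT B =====
-- Source B's inner 'for i, (_, keywords) in enumerate(…)' with break / for-else = first matching index
def pvFirstCat (s : String) : Option Nat := pvKwTable.findIdx? (fun ck => pvKwAny ck.2 s)

-- body of B's single 'for s in serializers' loop; state = (buckets, other, categorized)
def pvBStep (st : List (List String) × List String × PySem.Set String) (s : String) :
    List (List String) × List String × PySem.Set String :=
  if PySem.Set.contains st.2.2 s then st
  else
    match pvFirstCat s with
    | some i => (st.1.modify i (fun b => b ++ [s]), st.2.1, PySem.Set.add st.2.2 s)
    | none => (st.1, st.2.1 ++ [s], st.2.2)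

def categorize_serializers_py_alt (serializers : List String) : List (String × List String) :=
  let st := serializers.foldl pvBStep (pvKwTable.map (fun _ => ([] : List String)), [], PySem.Set.empty)
  let cats := (pvKwTable.zip st.1).foldl
    (fun acc p => if p.2 ≠ [] then acc ++ [(p.1.1, p.2)] else acc) []
  if st.2.1 ≠ [] then cats ++ [("Other Serializers", st.2.1)] else cats

-- ===== PRECONDITION & SPEC =====
def Spec_categorize_serializers_py (serializers : List String) (out : List (String × List String)) : Prop := out = categorize_serializers_py_alt serializers
instance (serializers : List String) (out : List (String × List String)) : Decidable (Spec_categorize_serializers_py serializers out) := by unfold Spec_categorize_serializers_py; infer_instance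

-- ===== CLAIM (what is proved, stated in full; the proofs are below) =====
def Claim_equal_categorize_serializers_py : Prop := ∀ (serializers : List String), Dom_categorize_serializers_py serializers → Spec_categorize_serializers_py serializers (categorize_serializers_py serializers)

-- ===== LEMMAS AND PROOFS =====

-- mid-level description both ports are reduced to: for category index i the bucket is the
-- subsequence of serializers whose FIRST matching category is i, first occurrences only
def pvSpecGo (i : Nat) (seen : List String) : List String → List String
  | [] => []
  | s :: r => if pvFirstCat s = some i ∧ s ∉ seen
              then s :: pvSpecGo i (s :: seen) r
              else pvSpecGo i seen r

def pvOut (L : List String) : Nat → List (String × List String) → List (String × List String)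
  | _, [] => []
  | i, ck :: r => (if pvSpecGo i [] L ≠ [] then [(ck.1, pvSpecGo i [] L)] else []) ++ pvOut L (i + 1) r

def pvOther (L : List String) : List String := L.filter (fun s => decide (pvFirstCat s = none))

theorem pvContains_add (S : PySem.Set String) (s x : String) :
    PySem.Set.contains (PySem.Set.add S s) x = true ↔ PySem.Set.contains S x = true ∨ x = s := by
  simp [PySem.Set.mem_add]

theorem pvFc_lt {s : String} {j : Nat} (h : pvFirstCat s = some j) : j < pvKwTable.length := by
  rw [pvFirstCat, List.findIdx?_eq_some_iff_getElem] at h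
  exact h.1

theorem pvFc_pred {s : String} {j : Nat} (h : pvFirstCat s = some j) :
    pvKwAny ((pvKwTable[j]'(pvFc_lt h)).2) s = true := by
  rw [pvFirstCat, List.findIdx?_eq_some_iff_getElem] at h
  exact h.2.1

theorem pvFc_min {s : String} {j j' : Nat} (h : pvFirstCat s = some j) (hj' : j' < j)
    (hlt : j' < pvKwTable.length) : ¬ pvKwAny ((pvKwTable[j']'hlt).2) s = true := by
  rw [pvFirstCat, List.findIdx?_eq_some_iff_getElem] at h
  exact h.2.2 j' hj'

theorem pvPred_fc {s : String} {j : Nat} (hj : j < pvKwTable.length)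
    (h : pvKwAny ((pvKwTable[j]'hj).2) s = true) : ∃ i ≤ j, pvFirstCat s = some i := by
  rcases hfc : pvFirstCat s with _ | i
  · rw [pvFirstCat, List.findIdx?_eq_none_iff] at hfc
    exact absurd h (by simpa using hfc pvKwTable[j] (List.getElem_mem hj))
  · refine ⟨i, ?_, rfl⟩
    by_contra hgt
    exact pvFc_min hfc (by omega) hj h

theorem pvMem_specGo (i : Nat) (l : List String) :
    ∀ (seen : List String) (x : String),
      x ∈ pvSpecGo i seen l ↔ x ∈ l ∧ pvFirstCat x = some i ∧ x ∉ seen := by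
  induction l with
  | nil => simp [pvSpecGo]
  | cons s r ih =>
    intro seen x
    by_cases h : pvFirstCat s = some i ∧ s ∉ seen
    · rw [pvSpecGo, if_pos h]
      constructor
      · intro hx
        rcases List.mem_cons.mp hx with rfl | hx
        · exact ⟨List.mem_cons_self, h.1, h.2⟩
        · obtain ⟨hr, hfc, hns⟩ := (ih _ x).mp hx
          exact ⟨List.mem_cons_of_mem _ hr, hfc,
            fun hm => hns (List.mem_cons_of_mem _ hm)⟩
      · rintro ⟨hl, hfc, hns⟩
        by_cases hxs : x = s
        · exact hxs ▸ List.mem_cons_self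
        · rcases List.mem_cons.mp hl with rfl | hr
          · exact absurd rfl hxs
          · exact List.mem_cons_of_mem _ ((ih _ x).mpr
              ⟨hr, hfc, by simp [List.mem_cons, hxs, hns]⟩)
    · rw [pvSpecGo, if_neg h]
      rw [ih]
      constructor
      · rintro ⟨hr, hfc, hns⟩
        exact ⟨List.mem_cons_of_mem _ hr, hfc, hns⟩
      · rintro ⟨hl, hfc, hns⟩
        rcases List.mem_cons.mp hl with rfl | hr
        · exact absurd ⟨hfc, hns⟩ h
        · exact ⟨hr, hfc, hns⟩

-- ===== A side: the inner scan over the serializers at category index i =====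
theorem pvAInner_char (i : Nat) (hi : i < pvKwTable.length) (l : List String) :
    ∀ (seen : List String) (S : PySem.Set String) (acc : List String),
    (∀ x ∈ l, (PySem.Set.contains S x = true ↔
        ∃ j, pvFirstCat x = some j ∧ (j < i ∨ (j = i ∧ x ∈ seen)))) →
    (l.foldl (pvAStep ((pvKwTable[i]'hi).2)) (acc, S)).1 = acc ++ pvSpecGo i seen l ∧
    (∀ x, PySem.Set.contains (l.foldl (pvAStep ((pvKwTable[i]'hi).2)) (acc, S)).2 x = true ↔
        (PySem.Set.contains S x = true ∨ x ∈ pvSpecGo i seen l)) := by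
  induction l with
  | nil => intro seen S acc _; simp [pvSpecGo]
  | cons s r ih =>
    intro seen S acc hinv
    rw [List.foldl_cons]
    by_cases hc : PySem.Set.contains S s = true
    · have hcond : ¬ (pvFirstCat s = some i ∧ s ∉ seen) := by
        rintro ⟨hfc, hns⟩
        obtain ⟨j, hj, hor⟩ := (hinv s List.mem_cons_self).mp hc
        rw [hfc] at hj
        obtain rfl : i = j := by injection hj
        rcases hor with h | ⟨-, hmem⟩
        · omega
        · exact hns hmem
      rw [pvAStep, if_pos hc]
      have := ih seen S acc (fun x hx => hinv x (List.mem_cons_of_mem _ hx))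
      rw [pvSpecGo, if_neg hcond]
      exact this
    · by_cases hk : pvKwAny ((pvKwTable[i]'hi).2) s = true
      · -- s is taken: its first category is exactly i and it is new
        have hfc : pvFirstCat s = some i := by
          obtain ⟨j, hji, hj⟩ := pvPred_fc hi hk
          rcases Nat.lt_or_ge j i with hlt | hge
          · exact absurd ((hinv s List.mem_cons_self).mpr ⟨j, hj, Or.inl hlt⟩) hc
          · obtain rfl : j = i := by omega
            exact hj
        have hns : s ∉ seen := fun hm =>
          absurd ((hinv s List.mem_cons_self).mpr ⟨i, hfc, Or.inr ⟨rfl, hm⟩⟩) hc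
        rw [pvAStep, if_neg hc, if_pos hk]
        have hinv' : ∀ x ∈ r, (PySem.Set.contains (PySem.Set.add S s) x = true ↔
            ∃ j, pvFirstCat x = some j ∧ (j < i ∨ (j = i ∧ x ∈ s :: seen))) := by
          intro x hx
          rw [pvContains_add]
          by_cases hxs : x = s
          · subst hxs
            constructor
            · intro _
              exact ⟨i, hfc, Or.inr ⟨rfl, List.mem_cons_self⟩⟩
            · intro _
              exact Or.inr rfl
          · rw [hinv x (List.mem_cons_of_mem _ hx)]
            constructor
            · rintro (⟨j, hj, hor⟩ | h)
              · exact ⟨j, hj, by tauto⟩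
              · exact absurd h hxs
            · rintro ⟨j, hj, hor⟩
              refine Or.inl ⟨j, hj, ?_⟩
              rcases hor with h | ⟨rfl, hm⟩
              · exact Or.inl h
              · rcases List.mem_cons.mp hm with h | h
                · exact absurd h hxs
                · exact Or.inr ⟨rfl, h⟩
        obtain ⟨h1, h2⟩ := ih (s :: seen) (PySem.Set.add S s) (acc ++ [s]) hinv'
        rw [pvSpecGo, if_pos ⟨hfc, hns⟩]
        constructor
        · rw [h1]; simp
        · intro x
          rw [h2 x, pvContains_add, List.mem_cons]
          tauto
      · have hcond : ¬ (pvFirstCat s = some i ∧ s ∉ seen) := by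
          rintro ⟨hfc, -⟩
          exact hk (pvFc_pred hfc)
        rw [pvAStep, if_neg hc, if_neg hk]
        have := ih seen S acc (fun x hx => hinv x (List.mem_cons_of_mem _ hx))
        rw [pvSpecGo, if_neg hcond]
        exact this

-- ===== A side: the outer loop over the category table =====
theorem pvAOuter_char (L : List String) :
    ∀ (rest : List (String × List String)) (i : Nat), pvKwTable.drop i = rest →
    ∀ (acc : List (String × List String)) (S : PySem.Set String),
    (∀ x, PySem.Set.contains S x = true ↔ x ∈ L ∧ ∃ j < i, pvFirstCat x = some j) →
    (rest.foldl (pvAOuterStep L) (acc, S)).1 = acc ++ pvOut L i rest ∧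
    (∀ x, PySem.Set.contains (rest.foldl (pvAOuterStep L) (acc, S)).2 x = true ↔
        x ∈ L ∧ ∃ j < i + rest.length, pvFirstCat x = some j) := by
  intro rest
  induction rest with
  | nil =>
    intro i _ acc S hS
    simpa [pvOut] using hS
  | cons ck r ih =>
    intro i hdrop acc S hS
    have hi : i < pvKwTable.length := by
      have h := congrArg List.length hdrop
      simp [List.length_drop] at h
      omega
    have hsplit : pvKwTable.drop i = pvKwTable[i] :: pvKwTable.drop (i + 1) :=
      List.drop_eq_getElem_cons hi
    rw [hdrop] at hsplit
    obtain ⟨hck, hdrop'⟩ := List.cons_eq_cons.mp hsplit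
    replace hck : pvKwTable[i] = ck := hck.symm
    replace hdrop' : pvKwTable.drop (i + 1) = r := hdrop'.symm
    have hinv : ∀ x ∈ L, (PySem.Set.contains S x = true ↔
        ∃ j, pvFirstCat x = some j ∧ (j < i ∨ (j = i ∧ x ∈ ([] : List String)))) := by
      intro x hx
      rw [hS x]
      simp only [List.not_mem_nil, and_false, or_false, hx, true_and]
      exact ⟨fun ⟨j, h1, h2⟩ => ⟨j, h2, h1⟩, fun ⟨j, h1, h2⟩ => ⟨j, h2, h1⟩⟩
    obtain ⟨h1, h2⟩ := pvAInner_char i hi L [] S [] hinv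
    rw [List.foldl_cons]
    have hstep : pvAOuterStep L (acc, S) ck =
        (if pvSpecGo i [] L ≠ [] then acc ++ [(ck.1, pvSpecGo i [] L)] else acc,
         (L.foldl (pvAStep ((pvKwTable[i]'hi).2)) ([], S)).2) := by
      rw [pvAOuterStep, ← hck]
      simp only [h1, List.nil_append]
    rw [hstep]
    have hS' : ∀ x, PySem.Set.contains (L.foldl (pvAStep ((pvKwTable[i]'hi).2)) ([], S)).2 x = true ↔
        x ∈ L ∧ ∃ j < i + 1, pvFirstCat x = some j := by
      intro x
      rw [h2 x, hS x, pvMem_specGo]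
      constructor
      · rintro (⟨hx, j, hj, hfc⟩ | ⟨hx, hfc, -⟩)
        · exact ⟨hx, j, by omega, hfc⟩
        · exact ⟨hx, i, by omega, hfc⟩
      · rintro ⟨hx, j, hj, hfc⟩
        rcases Nat.lt_or_ge j i with h | h
        · exact Or.inl ⟨hx, j, h, hfc⟩
        · obtain rfl : j = i := by omega
          exact Or.inr ⟨hx, hfc, by simp⟩
    obtain ⟨g1, g2⟩ := ih (i + 1) hdrop'
      (if pvSpecGo i [] L ≠ [] then acc ++ [(ck.1, pvSpecGo i [] L)] else acc)
      (L.foldl (pvAStep ((pvKwTable[i]'hi).2)) ([], S)).2 hS'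
    constructor
    · rw [g1, pvOut]
      by_cases he : pvSpecGo i [] L = [] <;> simp [he]
    · intro x
      rw [g2 x]
      constructor <;> rintro ⟨hx, j, hj, hfc⟩ <;> exact ⟨hx, j, by simp at *; omega, hfc⟩

-- ===== B side: bucket i of the single pass =====
theorem pvB_bucket (i : Nat) (l : List String) :
    ∀ (bks : List (List String)) (other : List String) (seen : PySem.Set String)
      (seenI : List String),
    (∀ x, pvFirstCat x = some i → (PySem.Set.contains seen x = true ↔ x ∈ seenI)) →
    ((l.foldl pvBStep (bks, other, seen)).1)[i]? =
      (fun b => b ++ pvSpecGo i seenI l) <$> bks[i]? := by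
  induction l with
  | nil =>
    intro bks other seen seenI _
    simp [pvSpecGo]
  | cons s r ih =>
    intro bks other seen seenI hm
    rw [List.foldl_cons]
    by_cases hc : PySem.Set.contains seen s = true
    · have hcond : ¬ (pvFirstCat s = some i ∧ s ∉ seenI) := by
        rintro ⟨hfc, hns⟩
        exact hns ((hm s hfc).mp hc)
      rw [pvBStep, if_pos hc, pvSpecGo, if_neg hcond]
      exact ih bks other seen seenI hm
    · rcases hfc : pvFirstCat s with _ | j
      · have hcond : ¬ (pvFirstCat s = some i ∧ s ∉ seenI) := by
          rintro ⟨h, -⟩; rw [hfc] at h; simp at h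
        rw [pvBStep, if_neg hc, hfc, pvSpecGo, if_neg hcond]
        exact ih bks (other ++ [s]) seen seenI hm
      · by_cases hj : j = i
        · subst hj
          have hns : s ∉ seenI := fun hmem => hc ((hm s hfc).mpr hmem)
          rw [pvBStep, if_neg hc, hfc, pvSpecGo, if_pos ⟨hfc, hns⟩]
          have hm' : ∀ x, pvFirstCat x = some j →
              (PySem.Set.contains (PySem.Set.add seen s) x = true ↔ x ∈ s :: seenI) := by
            intro x hx
            rw [pvContains_add, List.mem_cons]
            by_cases hxs : x = s
            · simp [hxs]
            · rw [hm x hx]; tauto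
          rw [ih (bks.modify j (fun b => b ++ [s])) other (PySem.Set.add seen s) (s :: seenI) hm']
          rw [List.getElem?_modify]
          cases bks[j]? <;> simp
        · have hcond : ¬ (pvFirstCat s = some i ∧ s ∉ seenI) := by
            rintro ⟨h, -⟩; rw [hfc] at h; exact hj (by injection h)
          rw [pvBStep, if_neg hc, hfc, pvSpecGo, if_neg hcond]
          have hm' : ∀ x, pvFirstCat x = some i →
              (PySem.Set.contains (PySem.Set.add seen s) x = true ↔ x ∈ seenI) := by
            intro x hx
            rw [pvContains_add, hm x hx]
            have hxs : x ≠ s := by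
              intro h
              rw [h, hfc] at hx
              exact hj (Option.some.inj hx)
            tauto
          rw [ih (bks.modify j (fun b => b ++ [s])) other (PySem.Set.add seen s) seenI hm']
          rw [List.getElem?_modify]
          have : j ≠ i := hj
          cases bks[i]? <;> simp [this]

-- ===== B side: the 'other' accumulator of the single pass =====
theorem pvB_other (l : List String) :
    ∀ (bks : List (List String)) (other : List String) (seen : PySem.Set String),
    (∀ x, PySem.Set.contains seen x = true → pvFirstCat x ≠ none) →
    (l.foldl pvBStep (bks, other, seen)).2.1 = other ++ pvOther l := by
  induction l with
  | nil => intro bks other seen _; simp [pvOther]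
  | cons s r ih =>
    intro bks other seen hseen
    rw [List.foldl_cons]
    by_cases hc : PySem.Set.contains seen s = true
    · have hn : ¬ pvFirstCat s = none := hseen s hc
      rw [pvBStep, if_pos hc, ih bks other seen hseen]
      simp only [pvOther, List.filter_cons]
      simp [hn]
    · rcases hfc : pvFirstCat s with _ | j
      · rw [pvBStep, if_neg hc, hfc, ih bks (other ++ [s]) seen hseen]
        simp only [pvOther, List.filter_cons]
        simp [hfc]
      · have hseen' : ∀ x, PySem.Set.contains (PySem.Set.add seen s) x = true →
            pvFirstCat x ≠ none := by
          intro x hx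
          rcases (pvContains_add seen s x).mp hx with h | rfl
          · exact hseen x h
          · simp [hfc]
        rw [pvBStep, if_neg hc, hfc, ih _ other _ hseen']
        simp only [pvOther, List.filter_cons]
        simp [hfc]

-- ===== B side: assembling the result from the buckets =====
theorem pvB_zip (L : List String) :
    ∀ (ts : List (String × List String)) (i : Nat) (bs : List (List String))
      (acc : List (String × List String)),
    (∀ j, j < ts.length → bs[j]? = some (pvSpecGo (i + j) [] L)) →
    (ts.zip bs).foldl (fun acc p => if p.2 ≠ [] then acc ++ [(p.1.1, p.2)] else acc) acc
      = acc ++ pvOut L i ts := by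
  intro ts
  induction ts with
  | nil => intro i bs acc _; simp [pvOut]
  | cons ck tr ih =>
    intro i bs acc h
    cases bs with
    | nil => exact absurd (h 0 (by simp)) (by simp)
    | cons b br =>
      have hb : b = pvSpecGo i [] L := by
        have := h 0 (by simp)
        simpa using this
      rw [List.zip_cons_cons, List.foldl_cons, pvOut]
      have htail : ∀ j, j < tr.length → br[j]? = some (pvSpecGo ((i + 1) + j) [] L) := by
        intro j hj
        have := h (j + 1) (by simp; omega)
        simpa [Nat.add_assoc, Nat.add_comm 1 j] using this
      rw [ih (i + 1) br _ htail, hb]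
      by_cases he : pvSpecGo i [] L = [] <;> simp [he]

-- ===== closed forms of the two ports =====
theorem pvA_closed (L : List String) :
    categorize_serializers_py L =
      pvOut L 0 pvKwTable ++
        (if pvOther L ≠ [] then [("Other Serializers", pvOther L)] else []) := by
  rw [categorize_serializers_py]
  have hS0 : ∀ x, PySem.Set.contains (PySem.Set.empty : PySem.Set String) x = true ↔
      x ∈ L ∧ ∃ j < 0, pvFirstCat x = some j := by
    intro x; simp
  obtain ⟨h1, h2⟩ := pvAOuter_char L pvKwTable 0 List.drop_zero [] PySem.Set.empty hS0
  rw [h1]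
  have hfilter : L.filter
      (fun s => !(PySem.Set.contains (pvKwTable.foldl (pvAOuterStep L) ([], PySem.Set.empty)).2 s))
      = pvOther L := by
    rw [pvOther]
    apply List.filter_congr
    intro x hx
    have hchar := h2 x
    by_cases hc : PySem.Set.contains (pvKwTable.foldl (pvAOuterStep L) ([], PySem.Set.empty)).2 x = true
    · obtain ⟨-, j, -, hfc⟩ := hchar.mp hc
      rw [hc]
      simp [hfc]
    · have hnone : pvFirstCat x = none := by
        rcases hfc : pvFirstCat x with _ | j
        · rfl
        · have hj := pvFc_lt hfc
          exact absurd (hchar.mpr ⟨hx, j, by simpa [pvKwTable] using hj, hfc⟩) hc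
      rw [Bool.eq_false_iff.mpr hc]
      simp [hnone]
  rw [hfilter]
  by_cases he : pvOther L = [] <;> simp [he, List.nil_append]

theorem pvB_closed (L : List String) :
    categorize_serializers_py_alt L =
      pvOut L 0 pvKwTable ++
        (if pvOther L ≠ [] then [("Other Serializers", pvOther L)] else []) := by
  rw [categorize_serializers_py_alt]
  have hseen0 : ∀ x, PySem.Set.contains (PySem.Set.empty : PySem.Set String) x = true →
      pvFirstCat x ≠ none := by intro x hx; simp at hx
  have hbuckets : ∀ j, j < pvKwTable.length →
      ((L.foldl pvBStep (pvKwTable.map (fun _ => ([] : List String)), [], PySem.Set.empty)).1)[j]?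
        = some (pvSpecGo (0 + j) [] L) := by
    intro j hj
    have hm0 : ∀ x, pvFirstCat x = some j →
        (PySem.Set.contains (PySem.Set.empty : PySem.Set String) x = true ↔ x ∈ ([] : List String)) := by
      intro x _; simp
    rw [pvB_bucket j L (pvKwTable.map (fun _ => ([] : List String))) [] PySem.Set.empty [] hm0]
    rw [List.getElem?_map]
    have : pvKwTable[j]? = some pvKwTable[j] := List.getElem?_eq_getElem hj
    rw [this]
    simp
  rw [pvB_zip L pvKwTable 0 _ [] hbuckets]
  rw [pvB_other L _ [] PySem.Set.empty hseen0]
  by_cases he : pvOther L = [] <;> simp [he]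

-- ===== VERDICT (by name: the statement is the Claim_ definition above) =====
theorem categorize_serializers_py_spec : Claim_equal_categorize_serializers_py := by
  intro serializers _
  unfold Spec_categorize_serializers_py
  rw [pvA_closed, pvB_closed]
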